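-- pv_equiv track=rewrite | github.com/lfscheidegger/aoc2025 | day12.py | present_to_shape_str
-- ===== SOURCE A (Python) =====
-- from typing import Generator, List, NewType, Tuple, Union
--
-- Present = NewType('Present', int)
--
-- def present_to_shape_str(present: Present) -> str:
--     result = ''
--     present &= 511
--     while present > 0:
--         result += '#' if present % 2 else '.'
--         present >>= 1
--
--     result = '.' * (9 - len(result)) + ''.join(reversed(result))
--     assert(len(result) == 9)
--     return result
-- ===== SOURCE B (Python) =====
-- def present_to_shape_str(present):
--     # MSB-first: test each of the 9 bits directly, no loop-reverse-pad dance
--     return ''.join('#' if (present >> k) & 1 else '.' for k in range(8, -1, -1))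
-- ===== Notes on version B (the rewrite author's own statement) =====
-- stated objective: simpler
-- what changed: Replaced A's low-to-high bit-extraction while loop with reversal and length-based left-padding by a single MSB-first pass testing each of the 9 bit positions directly ((present >> k) & 1 for k = 8..0).
import Mathlib
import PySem

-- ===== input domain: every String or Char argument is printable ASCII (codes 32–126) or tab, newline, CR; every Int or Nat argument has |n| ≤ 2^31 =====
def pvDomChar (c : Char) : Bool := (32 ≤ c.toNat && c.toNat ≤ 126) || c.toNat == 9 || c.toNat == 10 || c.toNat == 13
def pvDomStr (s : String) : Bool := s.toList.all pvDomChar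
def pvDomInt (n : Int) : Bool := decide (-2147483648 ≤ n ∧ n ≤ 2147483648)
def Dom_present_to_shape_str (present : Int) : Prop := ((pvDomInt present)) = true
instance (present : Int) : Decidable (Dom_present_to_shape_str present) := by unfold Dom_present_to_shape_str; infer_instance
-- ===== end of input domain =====

-- B replaces A's low-to-high bit loop + reverse + length-padding with a single
-- MSB-first pass over the 9 bit positions (objective: simpler).

-- ===== PORT A =====
-- the while loop: result grows low bit first; 'present >>= 1' on a nonnegative int is division by 2
-- fuel makes the recursion structural; started with fuel = p it is never exhausted (p halves each step)
def pvLoopA : Nat → Nat → List Char → List Char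
  | 0, _, result => result
  | fuel + 1, p, result =>
    if 0 < p then pvLoopA fuel (p / 2) (result ++ [if p % 2 = 1 then '#' else '.'])
    else result

def present_to_shape_str (present : Int) : String :=
  -- 'present &= 511' masks to the low 9 bits; on Python ints (negatives included) this equals present % 512 — exact
  let p : Nat := (PySem.Int.mod present 512).toNat
  let result := pvLoopA p p []
  String.mk (List.replicate (9 - result.length) '.' ++ result.reverse)

-- ===== PORT B =====
def present_to_shape_str_alt (present : Int) : String :=
  -- '(present >> k) & 1': Python's arithmetic right shift is floor-division by 2^k, '& 1' is mod 2 — exact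
  String.mk ((PySem.List.pyRange 8 (-1) (-1)).map (fun k =>
    if PySem.Int.mod (PySem.Int.floordiv present ((2:Int) ^ k.toNat)) 2 = 1 then '#' else '.'))

-- ===== PRECONDITION & SPEC =====
def Spec_present_to_shape_str (present : Int) (out : String) : Prop := out = present_to_shape_str_alt present
instance (present : Int) (out : String) : Decidable (Spec_present_to_shape_str present out) := by unfold Spec_present_to_shape_str; infer_instance

-- ===== CLAIM (what is proved, stated in full; the proofs are below) =====
def Claim_equal_present_to_shape_str : Prop := ∀ (present : Int), Dom_present_to_shape_str present → Spec_present_to_shape_str present (present_to_shape_str present)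

-- ===== LEMMAS AND PROOFS =====

-- A's computation applied to the masked residue r = present % 512, as a char list
def pvAfun (r : Nat) : List Char :=
  let result := pvLoopA r r []
  List.replicate (9 - result.length) '.' ++ result.reverse

-- B's computation applied to the masked residue, as a char list
def pvBfun (r : Nat) : List Char :=
  ([8,7,6,5,4,3,2,1,0] : List Nat).map (fun k => if (r / 2 ^ k) % 2 = 1 then '#' else '.')

set_option maxRecDepth 4000 in
set_option maxHeartbeats 1000000 in
lemma pv_key : ∀ r : Fin 512, pvAfun r.val = pvBfun r.val := by decide

lemma pv_bit (p : Int) (k : Nat) (hk : k ≤ 8) :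
    PySem.Int.mod (PySem.Int.floordiv p ((2:Int) ^ k)) 2
      = (((p % 512).toNat / 2 ^ k) % 2 : Nat) := by
  rw [PySem.Int.mod_eq_emod_of_pos (by norm_num),
      PySem.Int.floordiv_eq_ediv_of_pos (by positivity)]
  interval_cases k <;> norm_num <;> omega

lemma pv_A_eq (p : Int) : present_to_shape_str p = String.mk (pvAfun (p % 512).toNat) := by
  simp [present_to_shape_str, pvAfun]

lemma pv_range_lit : PySem.List.pyRange 8 (-1) (-1) = [8,7,6,5,4,3,2,1,0] := by decide

lemma pv_B_eq (p : Int) : present_to_shape_str_alt p = String.mk (pvBfun (p % 512).toNat) := by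
  simp only [present_to_shape_str_alt, pvBfun, pv_range_lit, List.map, show Int.toNat 8 = 8 by decide, show Int.toNat 7 = 7 by decide,
    show Int.toNat 6 = 6 by decide, show Int.toNat 5 = 5 by decide, show Int.toNat 4 = 4 by decide,
    show Int.toNat 3 = 3 by decide, show Int.toNat 2 = 2 by decide, show Int.toNat 1 = 1 by decide,
    show Int.toNat 0 = 0 by decide]
  rw [pv_bit p 8 (by norm_num), pv_bit p 7 (by norm_num), pv_bit p 6 (by norm_num),
    pv_bit p 5 (by norm_num), pv_bit p 4 (by norm_num), pv_bit p 3 (by norm_num),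
    pv_bit p 2 (by norm_num), pv_bit p 1 (by norm_num), pv_bit p 0 (by norm_num)]
  simp only [Nat.cast_eq_one]

-- ===== VERDICT (by name: the statement is the Claim_ definition above) =====
theorem present_to_shape_str_spec : Claim_equal_present_to_shape_str := by
  intro p _
  show present_to_shape_str p = present_to_shape_str_alt p
  rw [pv_A_eq, pv_B_eq]
  have hlt : (p % 512).toNat < 512 := by omega
  exact congrArg String.mk (pv_key ⟨_, hlt⟩)
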